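-- pv_equiv track=rewrite | github.com/kanna3939/MMD_AutoLipTool | src/gui/waveform_view.py | _normalized_tick_step
-- ===== SOURCE A (Python) =====
-- def _normalized_tick_step(minimum_step: int) -> int:
--     if minimum_step <= 1:
--         return 1
--     magnitude = 1
--     while magnitude * 10 < minimum_step:
--         magnitude *= 10
--     for candidate in (1, 2, 5, 10):
--         step = candidate * magnitude
--         if step >= minimum_step:
--             return step
--     return 10 * magnitude
-- ===== SOURCE B (Python) =====
-- def _normalized_tick_step(minimum_step: int) -> int:
--     if minimum_step <= 1:
--         return 1
--     if minimum_step <= 2: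
--         return 2
--     if minimum_step <= 5:
--         return 5
--     if minimum_step <= 10:
--         return 10
--     return 10 * _normalized_tick_step((minimum_step + 9) // 10)
-- ===== Notes on version B (the rewrite author's own statement) =====
-- stated objective: alternative
-- what changed: Replaces A's iterative magnitude search plus four-candidate scan with a recursion on decimal digits: base cases 1/2/5/10 for minimum_step <= 10, otherwise ceil-divide by 10, recurse, and multiply the result back by 10.
import Mathlib
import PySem

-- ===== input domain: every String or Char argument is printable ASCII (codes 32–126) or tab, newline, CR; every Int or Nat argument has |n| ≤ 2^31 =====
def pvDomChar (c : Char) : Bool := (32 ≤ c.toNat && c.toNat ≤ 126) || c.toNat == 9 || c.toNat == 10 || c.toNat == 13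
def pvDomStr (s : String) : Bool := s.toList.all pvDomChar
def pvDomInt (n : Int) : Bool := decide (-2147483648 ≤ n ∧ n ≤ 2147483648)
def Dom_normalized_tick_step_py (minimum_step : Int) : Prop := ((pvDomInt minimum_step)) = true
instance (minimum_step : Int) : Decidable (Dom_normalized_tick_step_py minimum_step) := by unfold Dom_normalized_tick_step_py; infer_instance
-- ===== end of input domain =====

-- B replaces A's magnitude search + candidate scan with a recursion on decimal digits
-- (ceil-divide by 10, recurse, multiply back); alternative decomposition, same cost.

-- ===== PORT A =====
-- the 'while magnitude * 10 < minimum_step' loop (the 0 < magnitude conjunct is only a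
-- totality guard; A always calls it with magnitude = 1)
def pyAWhile (minimum_step magnitude : Int) : Int :=
  if h : magnitude * 10 < minimum_step ∧ 0 < magnitude then
    pyAWhile minimum_step (magnitude * 10)
  else magnitude
termination_by (minimum_step - magnitude).toNat
decreasing_by omega

-- the 'for candidate in (1, 2, 5, 10)' scan, with A's (unreachable) trailing return
def pyAPick (minimum_step magnitude : Int) : Int :=
  if 1 * magnitude ≥ minimum_step then 1 * magnitude
  else if 2 * magnitude ≥ minimum_step then 2 * magnitude
  else if 5 * magnitude ≥ minimum_step then 5 * magnitude
  else if 10 * magnitude ≥ minimum_step then 10 * magnitude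
  else 10 * magnitude

def normalized_tick_step_py (minimum_step : Int) : Int :=
  if minimum_step ≤ 1 then 1
  else pyAPick minimum_step (pyAWhile minimum_step 1)

-- ===== PORT B =====
-- recursion on decimal digits: base cases up to 10, otherwise ceil-divide by 10,
-- recurse, multiply the result back by 10 ('//' ported exactly via PySem.Int.floordiv)
def normalized_tick_step_py_alt (minimum_step : Int) : Int :=
  if minimum_step ≤ 1 then 1
  else if minimum_step ≤ 2 then 2
  else if minimum_step ≤ 5 then 5
  else if minimum_step ≤ 10 then 10
  else 10 * normalized_tick_step_py_alt (PySem.Int.floordiv (minimum_step + 9) 10)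
termination_by minimum_step.toNat
decreasing_by
  rw [PySem.Int.floordiv_eq_ediv_of_pos (by norm_num : (0:Int) < 10)]
  omega

-- ===== PRECONDITION & SPEC =====
def Spec_normalized_tick_step_py (minimum_step : Int) (out : Int) : Prop := out = normalized_tick_step_py_alt minimum_step
instance (minimum_step : Int) (out : Int) : Decidable (Spec_normalized_tick_step_py minimum_step out) := by unfold Spec_normalized_tick_step_py; infer_instance

-- ===== CLAIM (what is proved, stated in full; the proofs are below) =====
def Claim_equal_normalized_tick_step_py : Prop := ∀ (minimum_step : Int), Dom_normalized_tick_step_py minimum_step → Spec_normalized_tick_step_py minimum_step (normalized_tick_step_py minimum_step)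

-- ===== LEMMAS AND PROOFS =====

theorem pyAWhile_pos (m mag : Int) (h : 0 < mag) : 0 < pyAWhile m mag := by
  rw [pyAWhile]
  split_ifs with hc
  · exact pyAWhile_pos m (mag * 10) (by omega)
  · exact h
termination_by (m - mag).toNat
decreasing_by omega

-- scaling: A's while loop from magnitude 10*mag on m equals 10 × the loop from mag on ⌈m/10⌉
theorem while_scale (m mag : Int) (hmag : 0 < mag) (hm : 10 < m) :
    pyAWhile m (10 * mag) = 10 * pyAWhile ((m + 9) / 10) mag := by
  have hd := Int.mul_ediv_add_emod (m + 9) 10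
  have hr0 := Int.emod_nonneg (m + 9) (by norm_num : (10:Int) ≠ 0)
  have hrlt := Int.emod_lt_of_pos (m + 9) (by norm_num : (0:Int) < 10)
  by_cases h : mag * 10 < (m + 9) / 10
  · have hc1 : 10 * mag * 10 < m ∧ 0 < 10 * mag := by constructor <;> omega
    conv_lhs => rw [pyAWhile, dif_pos hc1]
    conv_rhs => rw [pyAWhile, dif_pos ⟨h, hmag⟩]
    rw [show 10 * mag * 10 = 10 * (mag * 10) by ring]
    exact while_scale m (mag * 10) (by omega) hm
  · conv_lhs => rw [pyAWhile]
    conv_rhs => rw [pyAWhile]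
    rw [dif_neg (by omega), dif_neg (by omega)]
termination_by (m - mag).toNat
decreasing_by omega

-- scaling for the candidate scan
theorem pick_scale (m g : Int) (_hg : 0 < g) (_hm : 10 < m) :
    pyAPick m (10 * g) = 10 * pyAPick ((m + 9) / 10) g := by
  have hd := Int.mul_ediv_add_emod (m + 9) 10
  have hr0 := Int.emod_nonneg (m + 9) (by norm_num : (10:Int) ≠ 0)
  have hrlt := Int.emod_lt_of_pos (m + 9) (by norm_num : (0:Int) < 10)
  unfold pyAPick
  split_ifs <;> omega

theorem ab_eq (m : Int) : normalized_tick_step_py m = normalized_tick_step_py_alt m := by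
  by_cases h1 : m ≤ 1
  · rw [normalized_tick_step_py, if_pos h1, normalized_tick_step_py_alt, if_pos h1]
  · by_cases h10 : m ≤ 10
    · -- base cases 2..10: A's while loop stops at magnitude 1 immediately
      rw [normalized_tick_step_py, if_neg h1, pyAWhile, dif_neg (by omega),
          normalized_tick_step_py_alt]
      unfold pyAPick
      split_ifs <;> omega
    · -- recursive case: both sides scale by 10 over m' = ⌈m/10⌉
      have hd := Int.mul_ediv_add_emod (m + 9) 10
      have hr0 := Int.emod_nonneg (m + 9) (by norm_num : (10:Int) ≠ 0)
      have hrlt := Int.emod_lt_of_pos (m + 9) (by norm_num : (0:Int) < 10)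
      have hm'2 : 2 ≤ (m + 9) / 10 := by omega
      have hm'lt : (m + 9) / 10 < m := by omega
      rw [normalized_tick_step_py, if_neg h1, pyAWhile, dif_pos (by constructor <;> omega),
          show (1:Int) * 10 = 10 * 1 by ring, while_scale m 1 one_pos (by omega),
          pick_scale m (pyAWhile ((m + 9) / 10) 1) (pyAWhile_pos _ 1 one_pos) (by omega),
          show pyAPick ((m + 9) / 10) (pyAWhile ((m + 9) / 10) 1)
              = normalized_tick_step_py ((m + 9) / 10) by
            rw [normalized_tick_step_py, if_neg (by omega)],
          ab_eq ((m + 9) / 10)]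
      conv_rhs => rw [normalized_tick_step_py_alt]
      rw [if_neg h1, if_neg (by omega), if_neg (by omega), if_neg (by omega),
          PySem.Int.floordiv_eq_ediv_of_pos (by norm_num : (0:Int) < 10)]
termination_by m.toNat
decreasing_by omega

-- ===== VERDICT (by name: the statement is the Claim_ definition above) =====
theorem normalized_tick_step_py_spec : Claim_equal_normalized_tick_step_py := by
  intro m _
  unfold Spec_normalized_tick_step_py
  exact ab_eq m
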